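-- pv_equiv track=rewrite | github.com/wmedina1/vacaciones | app.py | shift_month
-- ===== SOURCE A (Python) =====
-- def shift_month(year: int, month: int, offset: int) -> tuple[int, int]:
--     new_month = month + offset
--     new_year = year
--
--     while new_month < 1:
--         new_month += 12
--         new_year -= 1
--     while new_month > 12:
--         new_month -= 12
--         new_year += 1
--
--     return new_year, new_month
-- ===== SOURCE B (Python) =====
-- def shift_month(year: int, month: int, offset: int) -> tuple[int, int]:
--     total = month + offset - 1
--     return year + total // 12, total % 12 + 1
-- ===== Notes on version B (the rewrite author's own statement) =====
-- stated objective: faster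
-- what changed: Replaces both normalization while-loops with a single closed-form floor-division/modulo computation on month+offset-1.
import Mathlib
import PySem

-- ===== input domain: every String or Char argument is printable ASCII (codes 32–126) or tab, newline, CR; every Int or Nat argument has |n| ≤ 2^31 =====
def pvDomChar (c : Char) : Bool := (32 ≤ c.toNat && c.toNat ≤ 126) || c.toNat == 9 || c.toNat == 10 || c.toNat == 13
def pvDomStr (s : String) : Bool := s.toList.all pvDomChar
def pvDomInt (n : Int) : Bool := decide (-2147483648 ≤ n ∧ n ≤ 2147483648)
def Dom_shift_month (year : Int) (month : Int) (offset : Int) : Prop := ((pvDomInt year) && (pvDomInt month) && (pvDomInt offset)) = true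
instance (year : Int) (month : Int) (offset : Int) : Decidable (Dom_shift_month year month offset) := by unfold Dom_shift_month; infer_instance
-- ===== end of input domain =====

-- B replaces A's two normalization while-loops by one closed-form floor-division computation (simpler).


-- ===== PORT A =====
-- first while loop: while new_month < 1: new_month += 12; new_year -= 1
def shiftMonthLoopUp (m y : Int) : Int × Int :=
  if m < 1 then shiftMonthLoopUp (m + 12) (y - 1) else (m, y)
termination_by (1 - m).toNat
decreasing_by omega

-- second while loop: while new_month > 12: new_month -= 12; new_year += 1
def shiftMonthLoopDown (m y : Int) : Int × Int :=
  if m > 12 then shiftMonthLoopDown (m - 12) (y + 1) else (m, y)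
termination_by (m - 12).toNat
decreasing_by omega

def shift_month (year : Int) (month : Int) (offset : Int) : Int × Int :=
  let p := shiftMonthLoopUp (month + offset) year
  let q := shiftMonthLoopDown p.1 p.2
  (q.2, q.1)

-- ===== PORT B =====
def shift_month_alt (year : Int) (month : Int) (offset : Int) : Int × Int :=
  let total := month + offset - 1
  (year + PySem.Int.floordiv total 12, PySem.Int.mod total 12 + 1)

-- ===== PRECONDITION & SPEC =====
def Spec_shift_month (year : Int) (month : Int) (offset : Int) (out : Int × Int) : Prop := out = shift_month_alt year month offset
instance (year : Int) (month : Int) (offset : Int) (out : Int × Int) : Decidable (Spec_shift_month year month offset out) := by unfold Spec_shift_month; infer_instance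

-- ===== CLAIM (what is proved, stated in full; the proofs are below) =====
def Claim_equal_shift_month : Prop := ∀ (year : Int) (month : Int) (offset : Int), Dom_shift_month year month offset → Spec_shift_month year month offset (shift_month year month offset)

-- ===== LEMMAS AND PROOFS =====

-- The down-loop, started at any m ≥ 1, computes the closed form.
theorem shiftMonthLoopDown_closed (m y : Int) (h : 1 ≤ m) :
    shiftMonthLoopDown m y = ((m - 1) % 12 + 1, y + (m - 1) / 12) := by
  rw [shiftMonthLoopDown]
  split_ifs with hgt
  · rw [shiftMonthLoopDown_closed (m - 12) (y + 1) (by omega)]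
    simp only [Prod.mk.injEq]
    refine ⟨by omega, ?_⟩
    have h12 : (m - 1 : Int) = (m - 12 - 1) + 12 * 1 := by ring
    rw [h12, Int.add_mul_ediv_left _ _ (by norm_num : (12:Int) ≠ 0)]
    ring
  · have h0 : (m - 1) % 12 = m - 1 := Int.emod_eq_of_lt (by omega) (by omega)
    have h1 : (m - 1) / 12 = 0 := Int.ediv_eq_zero_of_lt (by omega) (by omega)
    rw [h0, h1]; simp
termination_by (m - 12).toNat
decreasing_by omega

-- The up-loop, started at any m ≤ 12, computes the closed form (it overshoots nothing: result month ≤ 12).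
theorem shiftMonthLoopUp_closed (m y : Int) (h : m ≤ 12) :
    shiftMonthLoopUp m y = ((m - 1) % 12 + 1, y + (m - 1) / 12) := by
  rw [shiftMonthLoopUp]
  split_ifs with hlt
  · rw [shiftMonthLoopUp_closed (m + 12) (y - 1) (by omega)]
    simp only [Prod.mk.injEq]
    refine ⟨by omega, ?_⟩
    have h12 : (m + 12 - 1 : Int) = (m - 1) + 12 * 1 := by ring
    rw [h12, Int.add_mul_ediv_left _ _ (by norm_num : (12:Int) ≠ 0)]
    omega
  · have h0 : (m - 1) % 12 = m - 1 := Int.emod_eq_of_lt (by omega) (by omega)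
    have h1 : (m - 1) / 12 = 0 := Int.ediv_eq_zero_of_lt (by omega) (by omega)
    rw [h0, h1]; simp
termination_by (1 - m).toNat
decreasing_by omega

-- ===== VERDICT (by name: the statement is the Claim_ definition above) =====
theorem shift_month_spec : Claim_equal_shift_month := by
  intro year month offset _
  unfold Spec_shift_month
  simp only [shift_month, shift_month_alt]
  rw [PySem.Int.floordiv_eq_ediv_of_pos (by norm_num), PySem.Int.mod_eq_emod_of_pos (by norm_num)]
  set m := month + offset with hm
  by_cases h : m ≤ 12
  · rw [shiftMonthLoopUp_closed m year h, shiftMonthLoopDown]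
    have hle : (m - 1) % 12 + 1 ≤ 12 := by
      have := Int.emod_lt_of_pos (m - 1) (by norm_num : (0:Int) < 12); omega
    rw [if_neg (by omega)]
  · rw [shiftMonthLoopUp, if_neg (by omega),
      shiftMonthLoopDown_closed m year (by omega)]
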